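-- pv_equiv track=rewrite | github.com/ProjektAugustiner/yamoda | yamoda/query/pythonexpr.py | scan_for_delimiter
-- ===== SOURCE A (Python) =====
-- def scan_for_delimiter(text, delimiter=";", position=0, end=None):
--     """Scan for given delimiter outside of comments
--     `text` is valid when comments are closed and a delimiter outside of comments is found.
--     :param text: string to scan
--     :param delimiter: character to scan for
--     :param position: start position in `text`
--     :param end: end position in `text`, exclusive
--     :returns: delimiter position in string if valid, otherwise None
--     """
--     endpos = end if end is not None else len(text)
--     comment_sym = None
--     for c in text[position:endpos]:
--         if c == "'":
--             if comment_sym is None: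
--                 comment_sym = "'"
--             elif comment_sym == "'":
--                 comment_sym = None
--
--         elif c == '"':
--             if comment_sym is None:
--                 comment_sym = '"'
--             elif comment_sym == '"':
--                 comment_sym = None
--
--         elif c == delimiter:
--             if not comment_sym:
--                 return position
--         position += 1
-- ===== SOURCE B (Python) =====
-- def scan_for_delimiter(text, delimiter=";", position=0, end=None):
--     """Scan `text[position:end]` for `delimiter` outside of quoted spans.
--     Returns the delimiter's position (start position plus characters consumed)
--     or None if there is no such delimiter or a quote is left unterminated."""
--     endpos = end if end is not None else len(text)
--     seg = text[position:endpos]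
--     i = 0
--     while i < len(seg):
--         c = seg[i]
--         if c == "'" or c == '"':
--             i += 1
--             while i < len(seg) and seg[i] != c:
--                 i += 1
--             if i == len(seg):
--                 return None
--             i += 1
--         elif c == delimiter:
--             return position + i
--         else:
--             i += 1
--     return None
-- ===== Notes on version B (the rewrite author's own statement) =====
-- stated objective: alternative
-- what changed: A's single flat pass toggling a comment_sym flag per character is replaced by an outer index scan over the slice with an inner loop that jumps over each quoted span to its matching quote (returning None on an unterminated quote).
import Mathlib
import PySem

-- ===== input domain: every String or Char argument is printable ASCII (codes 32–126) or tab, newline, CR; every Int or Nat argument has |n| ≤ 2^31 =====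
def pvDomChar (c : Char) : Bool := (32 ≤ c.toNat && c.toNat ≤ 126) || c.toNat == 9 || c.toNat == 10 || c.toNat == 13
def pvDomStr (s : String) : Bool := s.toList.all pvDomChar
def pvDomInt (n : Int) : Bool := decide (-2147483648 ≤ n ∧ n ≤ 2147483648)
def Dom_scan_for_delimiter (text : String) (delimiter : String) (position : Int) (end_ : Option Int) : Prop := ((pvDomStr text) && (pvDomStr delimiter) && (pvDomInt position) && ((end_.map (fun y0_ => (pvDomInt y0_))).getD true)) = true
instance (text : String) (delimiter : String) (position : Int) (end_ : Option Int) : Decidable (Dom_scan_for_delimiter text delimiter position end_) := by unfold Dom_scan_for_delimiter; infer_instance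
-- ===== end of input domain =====

-- B replaces A's flat flag-toggling scan with an outer index scan of the slice and an inner quote-skip loop (alternative decomposition, same cost).

-- ===== PORT A =====
-- A's for-loop over text[position:endpos], carrying comment_sym and the mutable position counter.
def pvScanA (delim : List Char) : List Char → Option Char → Int → Option Int
  | [], _, _ => none
  | c :: rest, sym, pos =>
    if c = '\'' then
      pvScanA delim rest (if sym = none then some '\'' else if sym = some '\'' then none else sym) (pos + 1)
    else if c = '"' then
      pvScanA delim rest (if sym = none then some '"' else if sym = some '"' then none else sym) (pos + 1)
    else if [c] = delim then
      (if sym = none then some pos else pvScanA delim rest sym (pos + 1))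
    else pvScanA delim rest sym (pos + 1)

def scan_for_delimiter (text : String) (delimiter : String) (position : Int) (end_ : Option Int) : Option Int :=
  let endpos : Int := match end_ with | some e => e | none => (text.toList.length : Int)
  pvScanA delimiter.toList (PySem.List.slice text.toList (some position) (some endpos)) none position

-- ===== PORT B =====
-- Source B's inner while loop: advance i while i < len(seg) and seg[i] != q.
def pvSkipB (seg : List Char) (q : Char) (i : Nat) : Nat :=
  if i < seg.length then
    if seg.getD i ' ' ≠ q then pvSkipB seg q (i + 1) else i
  else i
termination_by seg.length - i

-- pvSkipB never moves left (cited by pvScanB's decreasing_by).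
theorem pvSkipB_le (seg : List Char) (q : Char) (i : Nat) : i ≤ pvSkipB seg q i := by
  unfold pvSkipB
  split
  · split
    · exact le_trans (Nat.le_succ i) (pvSkipB_le seg q (i + 1))
    · exact le_refl i
  · exact le_refl i
termination_by seg.length - i

-- Source B's outer while loop (c = seg[i] inlined); seg[i] is in range whenever read, ported as getD.
def pvScanB (seg : List Char) (delim : List Char) (position : Int) (i : Nat) : Option Int :=
  if _h : i < seg.length then
    if seg.getD i ' ' = '\'' ∨ seg.getD i ' ' = '"' then
      if pvSkipB seg (seg.getD i ' ') (i + 1) = seg.length then none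
      else pvScanB seg delim position (pvSkipB seg (seg.getD i ' ') (i + 1) + 1)
    else if [seg.getD i ' '] = delim then some (position + (i : Int))
    else pvScanB seg delim position (i + 1)
  else none
termination_by seg.length - i
decreasing_by
  · have := pvSkipB_le seg (seg.getD i ' ') (i + 1); omega
  · omega

def scan_for_delimiter_alt (text : String) (delimiter : String) (position : Int) (end_ : Option Int) : Option Int :=
  let endpos : Int := match end_ with | some e => e | none => (text.toList.length : Int)
  let seg := PySem.List.slice text.toList (some position) (some endpos)
  pvScanB seg delimiter.toList position 0

-- ===== PRECONDITION & SPEC =====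
def Spec_scan_for_delimiter (text : String) (delimiter : String) (position : Int) (end_ : Option Int) (out : Option Int) : Prop := out = scan_for_delimiter_alt text delimiter position end_
instance (text : String) (delimiter : String) (position : Int) (end_ : Option Int) (out : Option Int) : Decidable (Spec_scan_for_delimiter text delimiter position end_ out) := by unfold Spec_scan_for_delimiter; infer_instance

-- ===== CLAIM (what is proved, stated in full; the proofs are below) =====
def Claim_equal_scan_for_delimiter : Prop := ∀ (text : String) (delimiter : String) (position : Int) (end_ : Option Int), Dom_scan_for_delimiter text delimiter position end_ → Spec_scan_for_delimiter text delimiter position end_ (scan_for_delimiter text delimiter position end_)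

-- ===== LEMMAS AND PROOFS =====

-- seg.drop i uncoils one char while i is in range
theorem pvSeg_cons (seg : List Char) (i : Nat) (hih : i < seg.length) :
    seg.drop i = seg.getD i ' ' :: seg.drop (i + 1) := by
  rw [List.drop_eq_getElem_cons hih]
  congr 1
  exact (List.getD_eq_getElem seg ' ' hih).symm

-- inside a quote, A's flag-toggling skip is B's pvSkipB jump
theorem pvQuote_skip (delim seg : List Char) (q : Char) (hq : q = '\'' ∨ q = '"') (i : Nat) (p : Int) :
    pvScanA delim (seg.drop i) (some q) p =
      (if pvSkipB seg q i = seg.length then none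
       else pvScanA delim (seg.drop (pvSkipB seg q i + 1)) none (p + ((pvSkipB seg q i : Int) - i) + 1)) := by
  by_cases hih : i < seg.length
  · rw [pvSeg_cons seg i hih]
    unfold pvSkipB
    rw [if_pos hih]
    generalize hc : seg.getD i ' ' = c
    by_cases hcq : c = q
    · subst hcq
      have hin : (if c ≠ c then pvSkipB seg c (i + 1) else i) = i := if_neg (by simp)
      rw [hin, if_neg (by omega : ¬ i = seg.length)]
      rcases hq with h | h <;> subst h <;> simp [pvScanA]
    · rw [if_pos hcq]
      have hrec := pvQuote_skip delim seg q hq (i + 1) (p + 1)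
      have hstep : pvScanA delim (c :: seg.drop (i + 1)) (some q) p =
          pvScanA delim (seg.drop (i + 1)) (some q) (p + 1) := by
        rcases hq with h | h <;> subst h <;> by_cases h1 : c = '\'' <;> by_cases h2 : c = '"' <;>
          simp_all [pvScanA]
      rw [hstep, hrec]
      split
      · rfl
      · congr 1; push_cast; ring
  · have hskip : pvSkipB seg q i = i := by unfold pvSkipB; rw [if_neg hih]
    rw [List.drop_eq_nil_of_le (by omega), hskip]
    split
    · rfl
    · rw [List.drop_eq_nil_of_le (by omega)]; rfl
termination_by seg.length - i

-- main loop correspondence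
theorem pvMain (delim seg : List Char) (position : Int) (i : Nat) :
    pvScanA delim (seg.drop i) none (position + (i : Int)) = pvScanB seg delim position i := by
  unfold pvScanB
  by_cases hih : i < seg.length
  · rw [dif_pos hih, pvSeg_cons seg i hih]
    generalize hc : seg.getD i ' ' = c
    by_cases hquote : c = '\'' ∨ c = '"'
    · rw [if_pos hquote]
      have hstep : pvScanA delim (c :: seg.drop (i + 1)) none (position + (i : Int)) =
          pvScanA delim (seg.drop (i + 1)) (some c) (position + (i : Int) + 1) := by
        rcases hquote with h | h <;> simp [pvScanA, h]
      rw [hstep, pvQuote_skip delim seg c hquote (i + 1) _]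
      by_cases hfound : pvSkipB seg c (i + 1) = seg.length
      · rw [if_pos hfound, if_pos hfound]
      · rw [if_neg hfound, if_neg hfound,
          ← pvMain delim seg position (pvSkipB seg c (i + 1) + 1)]
        congr 1
        push_cast
        ring
    · rw [if_neg hquote]
      rw [not_or] at hquote
      obtain ⟨h1, h2⟩ := hquote
      by_cases hdel : [c] = delim
      · rw [if_pos hdel]
        simp [pvScanA, h1, h2, hdel]
      · rw [if_neg hdel, ← pvMain delim seg position (i + 1)]
        simp only [pvScanA, if_neg h1, if_neg h2, if_neg hdel]
        congr 1
        push_cast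
        ring
  · rw [dif_neg hih, List.drop_eq_nil_of_le (by omega)]
    rfl
termination_by seg.length - i
decreasing_by
  · have h1 := pvSkipB_le seg (seg.getD i ' ') (i + 1)
    omega
  · omega

-- ===== VERDICT (by name: the statement is the Claim_ definition above) =====
theorem scan_for_delimiter_spec : Claim_equal_scan_for_delimiter := by
  intro text delimiter position end_ _
  unfold Spec_scan_for_delimiter
  cases end_ with
  | none =>
      show pvScanA delimiter.toList (PySem.List.slice text.toList (some position) (some (text.toList.length : Int))) none position = _
      have := pvMain delimiter.toList (PySem.List.slice text.toList (some position) (some (text.toList.length : Int))) position 0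
      simpa using this
  | some e =>
      show pvScanA delimiter.toList (PySem.List.slice text.toList (some position) (some e)) none position = _
      have := pvMain delimiter.toList (PySem.List.slice text.toList (some position) (some e)) position 0
      simpa using this
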